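-- pv_equiv track=rewrite | github.com/MaximSinyaev/checkio | escher/4_find_thinnest_column.py | stone_wall
-- ===== SOURCE A (Python) =====
-- def stone_wall(wall):
--     '''
--     wall - 2D matrix with 2 types of chars '0' and '#' (also "\n") that represents wall from above
--     '''
--     wall = wall[1:] if wall[0] == "\n" else wall
--     l = len(wall)
--     lines = 0
--     for i in wall[1:]:
--         if i == "\n":
--             lines += 1
--     cols = (l - lines) // lines
--     min = lines
--     min_i = 0
--     for i in range(cols):
--         temp = sum([1 for i in wall[i: l - 1: cols + 1] if i == '#'])
--         if temp < min:
--             min = temp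
--             min_i = i
--     return min_i
-- ===== SOURCE B (Python) =====
-- def stone_wall(wall):
--     '''
--     wall - 2D matrix with 2 types of chars '0' and '#' (also "\n") that represents wall from above
--     '''
--     if wall[0] == "\n":
--         wall = wall[1:]
--     l = len(wall)
--     lines = wall.count("\n", 1)
--     cols = (l - lines) // lines
--     w = cols + 1
--     counts = [0] * w
--     for pos in range(l - 1):
--         if wall[pos] == '#':
--             counts[pos % w] += 1
--     best = lines
--     best_i = 0
--     for i in range(cols):
--         if counts[i] < best:
--             best = counts[i]
--             best_i = i
--     return best_i
-- ===== Notes on version B (the rewrite author's own statement) =====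
-- stated objective: alternative
-- what changed: Replaces the per-column strided-slice-and-sum loop with a single row-major pass that accumulates a table of filled-cell counts per column index (position mod cols+1), followed by a separate argmin scan over the table.
import Mathlib
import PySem

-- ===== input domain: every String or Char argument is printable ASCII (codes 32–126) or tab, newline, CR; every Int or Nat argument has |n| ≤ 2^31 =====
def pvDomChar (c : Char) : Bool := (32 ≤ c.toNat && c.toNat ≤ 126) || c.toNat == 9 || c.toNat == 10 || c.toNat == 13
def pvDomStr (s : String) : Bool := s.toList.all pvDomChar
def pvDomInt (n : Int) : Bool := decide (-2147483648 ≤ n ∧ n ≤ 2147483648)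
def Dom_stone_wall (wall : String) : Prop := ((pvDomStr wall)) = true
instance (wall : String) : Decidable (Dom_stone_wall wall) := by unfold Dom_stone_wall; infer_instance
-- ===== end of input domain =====

-- B replaces A's per-column strided-slice sums by one row-major pass building a per-column
-- table of filled-cell counts, then a separate argmin scan; same value everywhere A returns (alternative).

-- ===== PORT A =====

-- wall[a : stop : s] for 0 ≤ a and 0 < s (the only use below): elements at a, a+s, … below min(stop, len).
-- Exact Python step-slice semantics on that domain (PySem.List.slice has no step argument).
def stepSlice (cs : List Char) (a stop s : Int) : List Char :=
  if h : a < stop ∧ a < (cs.length : Int) ∧ 0 < s then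
    cs.getD a.toNat ' ' :: stepSlice cs (a + s) stop s
  else []
termination_by (stop - a).toNat
decreasing_by omega

def stone_wall (wall : String) : Int :=
  let cs0 := wall.toList
  if cs0 = [] then 0  -- Python: wall[0] raises IndexError here (excluded by Pre_)
  else
    -- wall = wall[1:] if wall[0] == "\n" else wall
    let cs := if cs0.head? = some '\n' then cs0.tail else cs0
    let l : Int := cs.length
    -- for i in wall[1:]: if i == "\n": lines += 1
    let lines : Int := cs.tail.foldl (fun acc i => if i = '\n' then acc + 1 else acc) 0
    if lines = 0 then 0  -- Python: ZeroDivisionError here (excluded by Pre_)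
    else
      let cols : Int := PySem.Int.floordiv (l - lines) lines
      let st := (PySem.List.pyRange 0 cols 1).foldl
        (fun (st : Int × Int) i =>
          -- temp = sum([1 for i in wall[i: l - 1: cols + 1] if i == '#'])
          let temp : Int :=
            (((stepSlice cs i (l - 1) (cols + 1)).filter (fun ch => ch == '#')).map
              (fun _ => (1 : Int))).sum
          if temp < st.1 then (temp, i) else st)
        (lines, 0)
      st.2

-- ===== PORT B =====
def stone_wall_alt (wall : String) : Int :=
  let cs0 := wall.toList
  if cs0 = [] then 0  -- Python: wall[0] raises IndexError here (excluded by Pre_)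
  else
    let cs := if cs0.head? = some '\n' then cs0.tail else cs0
    let l : Int := cs.length
    -- lines = wall.count("\n", 1)  (count of the single char '\n' from index 1 on)
    let lines : Int := (cs.tail.count '\n' : Int)
    if lines = 0 then 0  -- Python: ZeroDivisionError here (excluded by Pre_)
    else
      let cols : Int := PySem.Int.floordiv (l - lines) lines
      let w : Int := cols + 1
      -- counts = [0]*w; for pos in range(l-1): if wall[pos] == '#': counts[pos % w] += 1
      let counts : List Int := (PySem.List.pyRange 0 (l - 1) 1).foldl
        (fun acc pos =>
          if PySem.List.pyGetD cs pos ' ' = '#' then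
            acc.set (PySem.Int.mod pos w).toNat (acc.getD (PySem.Int.mod pos w).toNat 0 + 1)
          else acc)
        (List.replicate w.toNat 0)
      let st := (PySem.List.pyRange 0 cols 1).foldl
        (fun (st : Int × Int) i =>
          let c := PySem.List.pyGetD counts i 0
          if c < st.1 then (c, i) else st)
        (lines, 0)
      st.2

-- ===== PRECONDITION & SPEC =====
-- Pre_ excludes exactly the inputs where A raises: the empty string (IndexError on wall[0]) and
-- walls whose (possibly '\n'-stripped) remainder has no newline past index 0 (ZeroDivisionError).
def Pre_stone_wall (wall : String) : Prop :=
  wall.toList ≠ [] ∧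
  0 < ((if wall.toList.head? = some '\n' then wall.toList.tail else wall.toList).tail.count '\n')
instance (wall : String) : Decidable (Pre_stone_wall wall) := by unfold Pre_stone_wall; infer_instance
def pvWitness_stone_wall : String := "0#\n#0\n"

def Spec_stone_wall (wall : String) (out : Int) : Prop := out = stone_wall_alt wall
instance (wall : String) (out : Int) : Decidable (Spec_stone_wall wall out) := by unfold Spec_stone_wall; infer_instance

-- ===== CLAIM (what is proved, stated in full; the proofs are below) =====
def Claim_equal_stone_wall : Prop := ∀ (wall : String), Dom_stone_wall wall → Pre_stone_wall wall → Spec_stone_wall wall (stone_wall wall)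

-- ===== LEMMAS AND PROOFS =====

-- number of '#' among positions p < m with p % w = j
def hits (cs : List Char) (w j m : Nat) : Nat :=
  (List.range m).countP (fun p => (p % w == j) && (cs.getD p ' ' == '#'))

theorem countP_or_disjoint {α : Type} (l : List α) (f g h : α → Bool)
    (hfg : ∀ x ∈ l, f x = (g x || h x)) (hd : ∀ x ∈ l, ¬(g x = true ∧ h x = true)) :
    l.countP f = l.countP g + l.countP h := by
  induction l with
  | nil => simp
  | cons a t ih =>
    simp only [List.countP_cons]
    rw [ih (fun x hx => hfg x (.tail _ hx)) (fun x hx => hd x (.tail _ hx)),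
        hfg a (.head _)]
    have := hd a (.head _)
    cases hg : g a <;> cases hh : h a <;> simp_all <;> omega

theorem countP_eq_and_range (b a : Nat) (q : Nat → Bool) (hab : a < b) :
    (List.range b).countP (fun p => (p == a) && q p) = if q a then 1 else 0 := by
  induction b with
  | zero => omega
  | succ m ih =>
    rw [List.range_succ, List.countP_append]
    by_cases hm : a < m
    · rw [ih hm]
      have : ((m == a) && q m) = false := by
        have : (m == a) = false := by simp; omega
        simp [this]
      simp [this]
    · have ham : a = m := by omega
      subst ham
      have h0 : (List.range a).countP (fun p => (p == a) && q p) = 0 := by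
        apply List.countP_eq_zero.2
        intro p hp
        have : p < a := List.mem_range.1 hp
        have : (p == a) = false := by simp; omega
        simp [this]
      simp [h0]

theorem class_split (s a p : Nat) (hs : 0 < s) :
    (a ≤ p ∧ (p - a) % s = 0) ↔ (p = a ∨ (a + s ≤ p ∧ (p - (a + s)) % s = 0)) := by
  constructor
  · rintro ⟨h1, h2⟩
    obtain ⟨k, hk⟩ := Nat.dvd_of_mod_eq_zero h2
    match k, hk with
    | 0, hk => left; omega
    | k+1, hk =>
      right
      have hk' : p - a = s * k + s := by rw [hk]; ring
      refine ⟨by omega, ?_⟩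
      have : p - (a + s) = s * k := by omega
      simp [this, Nat.mul_mod_right]
  · rintro (rfl | ⟨h1, h2⟩)
    · simp
    · refine ⟨by omega, ?_⟩
      obtain ⟨k, hk⟩ := Nat.dvd_of_mod_eq_zero h2
      have : p - a = s * k + s := by omega
      rw [this, show s * k + s = s * (k + 1) by ring]
      simp [Nat.mul_mod_right]

theorem mod_class (s a p : Nat) (hs : 0 < s) (ha : a < s) :
    p % s = a ↔ (a ≤ p ∧ (p - a) % s = 0) := by
  constructor
  · rintro rfl
    refine ⟨Nat.mod_le _ _, ?_⟩
    have h := Nat.div_add_mod p s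
    have : p - p % s = s * (p / s) := by omega
    simp [this, Nat.mul_mod_right]
  · rintro ⟨h1, h2⟩
    obtain ⟨k, hk⟩ := Nat.dvd_of_mod_eq_zero h2
    have hp : p = a + s * k := by omega
    subst hp
    simp [Nat.add_mul_mod_self_left, Nat.mod_eq_of_lt ha]

-- A's per-column strided-slice count, in generalized form
theorem stepSlice_count_gen (cs : List Char) (s : Nat) (hs : 0 < s) :
    ∀ (b : Nat), b ≤ cs.length → ∀ (a : Nat),
    ((stepSlice cs a b s).filter (fun ch => ch == '#')).length
      = (List.range b).countP
          (fun p => (a ≤ p) && ((p - a) % s == 0) && (cs.getD p ' ' == '#')) := by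
  intro b hb a
  generalize hn : b - a = n
  induction n using Nat.strong_induction_on generalizing a with
  | _ n ih =>
  by_cases hab : a < b
  · rw [stepSlice, dif_pos ⟨by exact_mod_cast hab,
      by exact_mod_cast lt_of_lt_of_le hab hb, by exact_mod_cast hs⟩]
    have hrec := ih (b - (a + s)) (by omega) (a + s) rfl
    rw [countP_or_disjoint (List.range b)
         (fun p => (decide (a ≤ p) && ((p - a) % s == 0)) && (cs.getD p ' ' == '#'))
         (fun p => (p == a) && (cs.getD p ' ' == '#'))
         (fun p => (decide (a + s ≤ p) && ((p - (a + s)) % s == 0)) && (cs.getD p ' ' == '#'))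
         ?_ ?_]
    · rw [countP_eq_and_range b a _ hab]
      have hcast : ((a : Int) + (s : Int)) = ((a + s : Nat) : Int) := by push_cast; ring
      rw [hcast]
      simp only [Int.toNat_natCast, List.filter_cons]
      by_cases hhit : (cs.getD a ' ' == '#') = true
      · simp only [hhit, if_true, List.length_cons, hrec]
        omega
      · simp only [hhit, if_false, Bool.false_eq_true, hrec]
        simp only [Bool.not_eq_true] at hhit
        simp [hhit]
    · intro p hp
      rw [Bool.eq_iff_iff]
      simp only [Bool.and_eq_true, Bool.or_eq_true, decide_eq_true_eq, beq_iff_eq]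
      have h := class_split s a p hs
      tauto
    · intro p hp hcontra
      obtain ⟨h1, h2⟩ := hcontra
      simp only [Bool.and_eq_true, beq_iff_eq, decide_eq_true_eq, Nat.beq_eq_true_eq] at h1 h2
      omega
  · rw [stepSlice, dif_neg (by push_cast; omega)]
    simp only [List.filter_nil, List.length_nil]
    symm
    apply List.countP_eq_zero.2
    intro p hp
    have hpb := List.mem_range.1 hp
    simp only [Bool.and_eq_true, decide_eq_true_eq, not_and]
    rintro ⟨h1, _⟩
    omega

-- A's per-column count equals hits
theorem stepSlice_count (cs : List Char) (s : Nat) (b : Nat) (a : Nat)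
    (hs : 0 < s) (hb : b ≤ cs.length) (ha : a < s) :
    (((stepSlice cs a b s).filter (fun ch => ch == '#')).map (fun _ => (1 : Int))).sum
      = (hits cs s a b : Int) := by
  rw [PySem.List.sum_map_const_int, mul_one]
  rw [stepSlice_count_gen cs s hs b hb a]
  congr 1
  unfold hits
  apply List.countP_congr
  intro p hp
  simp only [Bool.and_eq_true, decide_eq_true_eq, beq_iff_eq, Nat.beq_eq_true_eq]
  have h := mod_class s a p hs ha
  tauto

-- B's fold: length is preserved
theorem foldB_length (cs : List Char) (w : Int) (l : List Int) (acc : List Int) :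
    (l.foldl
      (fun acc pos =>
        if PySem.List.pyGetD cs pos ' ' = '#' then
          acc.set (PySem.Int.mod pos w).toNat (acc.getD (PySem.Int.mod pos w).toNat 0 + 1)
        else acc) acc).length = acc.length := by
  induction l generalizing acc with
  | nil => rfl
  | cons p t ih =>
    simp only [List.foldl_cons]
    split
    · rw [ih, List.length_set]
    · rw [ih]

-- B's fold computes hits
theorem foldB_hits (cs : List Char) (wN : Nat) (hw : 0 < wN) :
    ∀ (m : Nat), m ≤ cs.length → ∀ (acc : List Int) (j : Nat), j < acc.length →
    ((PySem.List.pyRange 0 (m : Int) 1).foldl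
      (fun acc pos =>
        if PySem.List.pyGetD cs pos ' ' = '#' then
          acc.set (PySem.Int.mod pos (wN : Int)).toNat
            (acc.getD (PySem.Int.mod pos (wN : Int)).toNat 0 + 1)
        else acc) acc).getD j 0
      = acc.getD j 0 + (hits cs wN j m : Int) := by
  intro m
  induction m with
  | zero =>
    intro _ acc j hj
    simp [PySem.List.pyRange_zero, hits]
  | succ m ih =>
    intro hm acc j hj
    have hstep : PySem.List.pyRange 0 ((m + 1 : Nat) : Int) 1
        = PySem.List.pyRange 0 ((m : Nat) : Int) 1 ++ [((m : Nat) : Int)] := by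
      push_cast
      exact PySem.List.pyRange_one_succ_right (by positivity)
    rw [hstep, List.foldl_append]
    simp only [List.foldl_cons, List.foldl_nil]
    have hFlen := foldB_length cs (wN : Int) (PySem.List.pyRange 0 ((m : Nat) : Int) 1) acc
    have hih := ih (by omega) acc
    rw [PySem.List.pyGetD_natCast]
    have hmod : (PySem.Int.mod ((m : Nat) : Int) ((wN : Nat) : Int)).toNat = m % wN := by
      rw [PySem.Int.mod_natCast, Int.toNat_natCast]
    rw [hmod]
    have hhits : hits cs wN j (m + 1)
        = hits cs wN j m + (if ((m % wN == j) && (cs.getD m ' ' == '#')) = true then 1 else 0) := by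
      unfold hits
      rw [List.range_succ, List.countP_append]
      simp [List.countP_cons]
    by_cases hhit : cs.getD m ' ' = '#'
    · rw [if_pos hhit]
      by_cases hjm : j = m % wN
      · subst hjm
        rw [List.getD_eq_getElem?_getD,
          List.getElem?_set_self (by rw [hFlen]; exact hj), Option.getD_some,
          hih _ hj, hhits, show (cs.getD m ' ' == '#') = true from beq_iff_eq.mpr hhit]
        simp only [beq_self_eq_true, Bool.true_and, if_true]
        push_cast
        ring
      · rw [List.getD_eq_getElem?_getD, List.getElem?_set_ne (fun h => hjm h.symm),
          ← List.getD_eq_getElem?_getD, hih j hj, hhits,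
          show (m % wN == j) = false from beq_eq_false_iff_ne.mpr (fun h => hjm h.symm)]
        simp
    · rw [if_neg hhit, hih j hj, hhits,
        show (cs.getD m ' ' == '#') = false from beq_eq_false_iff_ne.mpr hhit]
      simp

-- ===== VERDICT (by name: the statement is the Claim_ definition above) =====
theorem stone_wall_spec : Claim_equal_stone_wall := by
  intro wall _ hpre
  unfold Spec_stone_wall
  obtain ⟨hne, hcnt⟩ := hpre
  simp only [stone_wall, stone_wall_alt, if_neg hne]
  set cs := (if wall.toList.head? = some '\n' then wall.toList.tail else wall.toList) with hcs
  have hlines : (cs.tail.foldl (fun acc i => if i = '\n' then acc + 1 else acc) (0 : Int))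
      = ((cs.tail.count '\n' : Nat) : Int) := by
    rw [PySem.List.foldl_ite_add_one (p := fun i => i = '\n'), zero_add]
    congr 1
  rw [hlines]
  have hlpos : (0 : Int) < ((cs.tail.count '\n' : Nat) : Int) := by exact_mod_cast hcnt
  rw [if_neg (by omega), if_neg (by omega)]
  have htl : cs.tail.length = cs.length - 1 := List.length_tail
  have hlle : cs.tail.count '\n' ≤ cs.tail.length := List.count_le_length
  have hlen2 : 2 ≤ cs.length := by omega
  set lines : Int := ((cs.tail.count '\n' : Nat) : Int) with hlinesdef
  set cols := PySem.Int.floordiv ((cs.length : Int) - lines) lines with hcols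
  have hlinle : lines ≤ (cs.length : Int) - 1 := by rw [hlinesdef]; push_cast; omega
  have hcols0 : 0 ≤ cols := by
    rw [hcols, PySem.Int.floordiv_eq_ediv_of_pos hlpos]
    exact Int.ediv_nonneg (by omega) (by omega)
  set wN := (cols + 1).toNat with hwN
  have hw1 : ((wN : Nat) : Int) = cols + 1 := Int.toNat_of_nonneg (by omega)
  have hwpos : 0 < wN := by omega
  set mN := cs.length - 1 with hmN
  have hm1 : ((mN : Nat) : Int) = (cs.length : Int) - 1 := by omega
  rw [show (cs.length : Int) - 1 = ((mN : Nat) : Int) from hm1.symm,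
      show cols + 1 = ((wN : Nat) : Int) from hw1.symm]
  have hcounts := foldB_hits cs wN hwpos mN (by omega) (List.replicate wN (0 : Int))
  apply congrArg Prod.snd
  apply PySem.List.foldl_congr_mem
  intro acc i hi
  obtain ⟨hi0, hic⟩ := PySem.List.mem_pyRange_one.1 hi
  have hii : i = (i.toNat : Int) := (Int.toNat_of_nonneg hi0).symm
  have hiw : i.toNat < wN := by omega
  rw [hii, stepSlice_count cs wN mN i.toNat hwpos (by omega) hiw,
      PySem.List.pyGetD_natCast,
      hcounts i.toNat (by rw [List.length_replicate]; exact hiw)]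
  simp
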